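-- pv_equiv track=rewrite | github.com/rob1-uk/zenflow | zenflow/ai/insights.py | _parse_optimal_times_response
-- ===== SOURCE A (Python) =====
-- def _parse_optimal_times_response(optimal_times: str) -> dict[str, str]:
--     """Parse AI optimal times response into dict.
--
--     Args:
--         optimal_times: Raw AI response text
--
--     Returns:
--         Dict with time recommendations for different activities
--     """
--     result = {
--         "high_focus": "Morning (9-11 AM)",
--         "task_execution": "Afternoon (2-4 PM)",
--         "habits": "Morning or Evening",
--     }
--
--     lower_text = optimal_times.lower()
--
--     if "high-focus" in lower_text or "deep work" in lower_text:
--         for line in optimal_times.split("\n"):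
--             if "high-focus" in line.lower() or "deep work" in line.lower():
--                 result["high_focus"] = (
--                     line.split(":", 1)[-1].strip() if ":" in line else line.strip()
--                 )
--                 break
--
--     if "task execution" in lower_text or "task completion" in lower_text:
--         for line in optimal_times.split("\n"):
--             if "task execution" in line.lower() or "task completion" in line.lower():
--                 result["task_execution"] = (
--                     line.split(":", 1)[-1].strip() if ":" in line else line.strip()
--                 )
--                 break
--
--     if "habit" in lower_text:
--         for line in optimal_times.split("\n"):
--             if "habit" in line.lower():
--                 result["habits"] = (
--                     line.split(":", 1)[-1].strip() if ":" in line else line.strip()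
--                 )
--                 break
--
--     return result
-- ===== SOURCE B (Python) =====
-- def _extract(line: str) -> str:
--     return line.split(":", 1)[-1].strip() if ":" in line else line.strip()
--
--
-- def _parse_optimal_times_response(optimal_times: str) -> dict[str, str]:
--     """Single pass over the lines with one Optional accumulator per category;
--     the dict is built once at the end from the accumulators (defaults if unset)."""
--     high_focus = task_execution = habits = None
--     for line in optimal_times.split("\n"):
--         low = line.lower()
--         if high_focus is None and ("high-focus" in low or "deep work" in low):
--             high_focus = _extract(line)
--         if task_execution is None and ("task execution" in low or "task completion" in low):
--             task_execution = _extract(line)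
--         if habits is None and "habit" in low:
--             habits = _extract(line)
--     return {
--         "high_focus": high_focus if high_focus is not None else "Morning (9-11 AM)",
--         "task_execution": task_execution if task_execution is not None else "Afternoon (2-4 PM)",
--         "habits": habits if habits is not None else "Morning or Evening",
--     }
-- ===== Notes on version B (the rewrite author's own statement) =====
-- stated objective: simpler
-- what changed: B replaces A's three whole-text keyword guards each followed by its own rescan of the lines with a single pass over the lines carrying one Option accumulator per category, building the result dict once at the end.
import Mathlib
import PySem

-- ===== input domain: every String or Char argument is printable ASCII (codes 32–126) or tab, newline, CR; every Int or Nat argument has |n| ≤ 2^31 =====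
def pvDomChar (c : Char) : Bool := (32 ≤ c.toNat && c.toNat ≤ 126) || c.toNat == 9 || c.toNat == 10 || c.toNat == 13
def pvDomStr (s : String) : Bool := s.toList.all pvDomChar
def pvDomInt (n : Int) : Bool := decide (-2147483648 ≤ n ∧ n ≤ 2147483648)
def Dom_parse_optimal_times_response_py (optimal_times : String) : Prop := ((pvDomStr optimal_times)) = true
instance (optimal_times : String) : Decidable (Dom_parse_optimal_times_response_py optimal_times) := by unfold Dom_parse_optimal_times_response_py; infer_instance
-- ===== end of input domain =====

-- B replaces A's three guarded rescans of the lines with one pass carrying an Option accumulator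
-- per category, building the result dict once at the end (objective: simpler; same return value).

-- ===== PORT A =====
-- line.split(":", 1)[-1].strip() if ":" in line else line.strip()
def pvExtractA (line : String) : String :=
  if PySem.Str.isIn ":" line then
    PySem.Str.strip (String.ofList
      ((PySem.List.pyGet? (PySem.Chars.splitOnMax line.toList [':'] 1) (-1)).getD []))
  else PySem.Str.strip line

def pvMatch1 (line : String) : Bool :=
  PySem.Str.isIn "high-focus" (PySem.Str.lower line) || PySem.Str.isIn "deep work" (PySem.Str.lower line)
def pvMatch2 (line : String) : Bool :=
  PySem.Str.isIn "task execution" (PySem.Str.lower line) || PySem.Str.isIn "task completion" (PySem.Str.lower line)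
def pvMatch3 (line : String) : Bool :=
  PySem.Str.isIn "habit" (PySem.Str.lower line)

-- A's 'for line in lines: if p(line): result[key] = extract(line); break'
def pvFindLoop (p : String → Bool) (key : String) (lines : List String)
    (d : PySem.Dict String String) : PySem.Dict String String :=
  match lines with
  | [] => d
  | l :: rest => if p l then d.insert key (pvExtractA l) else pvFindLoop p key rest d

def parse_optimal_times_response_py (optimal_times : String) : List (String × String) :=
  let result := PySem.Dict.ofList
    [("high_focus", "Morning (9-11 AM)"), ("task_execution", "Afternoon (2-4 PM)"), ("habits", "Morning or Evening")]
  let lower_text := PySem.Str.lower optimal_times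
  let lines := (PySem.Chars.splitOn optimal_times.toList ['\n']).map String.ofList
  let result :=
    if PySem.Str.isIn "high-focus" lower_text || PySem.Str.isIn "deep work" lower_text then
      pvFindLoop pvMatch1 "high_focus" lines result
    else result
  let result :=
    if PySem.Str.isIn "task execution" lower_text || PySem.Str.isIn "task completion" lower_text then
      pvFindLoop pvMatch2 "task_execution" lines result
    else result
  let result :=
    if PySem.Str.isIn "habit" lower_text then
      pvFindLoop pvMatch3 "habits" lines result
    else result
  result.items

-- ===== PORT B =====
def pvExtractB (line : String) : String :=
  if PySem.Str.isIn ":" line then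
    PySem.Str.strip (String.ofList
      ((PySem.List.pyGet? (PySem.Chars.splitOnMax line.toList [':'] 1) (-1)).getD []))
  else PySem.Str.strip line

-- one loop body: three independent Option accumulators, each set at most once
def pvStep (acc : Option String × Option String × Option String) (line : String) :
    Option String × Option String × Option String :=
  let low := PySem.Str.lower line
  let hf := if acc.1.isNone && (PySem.Str.isIn "high-focus" low || PySem.Str.isIn "deep work" low) then
      some (pvExtractB line) else acc.1
  let te := if acc.2.1.isNone && (PySem.Str.isIn "task execution" low || PySem.Str.isIn "task completion" low) then
      some (pvExtractB line) else acc.2.1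
  let hb := if acc.2.2.isNone && PySem.Str.isIn "habit" low then
      some (pvExtractB line) else acc.2.2
  (hf, te, hb)

def parse_optimal_times_response_py_alt (optimal_times : String) : List (String × String) :=
  let lines := (PySem.Chars.splitOn optimal_times.toList ['\n']).map String.ofList
  let acc := lines.foldl pvStep (none, none, none)
  [("high_focus", acc.1.getD "Morning (9-11 AM)"),
   ("task_execution", acc.2.1.getD "Afternoon (2-4 PM)"),
   ("habits", acc.2.2.getD "Morning or Evening")]

-- ===== PRECONDITION & SPEC =====
def Spec_parse_optimal_times_response_py (optimal_times : String) (out : List (String × String)) : Prop := out = parse_optimal_times_response_py_alt optimal_times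
instance (optimal_times : String) (out : List (String × String)) : Decidable (Spec_parse_optimal_times_response_py optimal_times out) := by unfold Spec_parse_optimal_times_response_py; infer_instance

-- ===== CLAIM (what is proved, stated in full; the proofs are below) =====
def Claim_equal_parse_optimal_times_response_py : Prop := ∀ (optimal_times : String), Dom_parse_optimal_times_response_py optimal_times → Spec_parse_optimal_times_response_py optimal_times (parse_optimal_times_response_py optimal_times)

-- ===== LEMMAS AND PROOFS =====

theorem pvGo_zero (sep l cur : List Char) (acc : List (List Char)) :
    PySem.Chars.splitOn.go sep 0 l cur acc = ((cur.reverse ++ l) :: acc).reverse := by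
  rw [PySem.Chars.splitOn.go]

theorem pvGo_nil (sep cur : List Char) (acc : List (List Char)) (fuel : Nat) :
    PySem.Chars.splitOn.go sep (fuel + 1) [] cur acc = (cur.reverse :: acc).reverse := by
  rw [PySem.Chars.splitOn.go]
  simp

theorem pvGo_cons (sep cur : List Char) (acc : List (List Char)) (fuel : Nat) (c : Char) (rest : List Char) :
    PySem.Chars.splitOn.go sep (fuel + 1) (c :: rest) cur acc =
      if sep.isPrefixOf (c :: rest) = true then
        PySem.Chars.splitOn.go sep fuel (List.drop sep.length (c :: rest)) [] (cur.reverse :: acc)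
      else PySem.Chars.splitOn.go sep fuel rest (c :: cur) acc := by
  rw [PySem.Chars.splitOn.go]

theorem pvMem_go_infix (sep : List Char) (fuel : Nat) :
    ∀ (l cur : List Char) (acc : List (List Char)) (x : List Char),
      x ∈ PySem.Chars.splitOn.go sep fuel l cur acc → x ∈ acc ∨ x <:+: (cur.reverse ++ l) := by
  induction fuel with
  | zero =>
    intro l cur acc x hx
    rw [pvGo_zero] at hx
    simp only [List.mem_reverse, List.mem_cons] at hx
    rcases hx with h | h
    · exact Or.inr (h ▸ List.infix_refl _)
    · exact Or.inl h
  | succ fuel ih =>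
    intro l cur acc x hx
    match l with
    | [] =>
      rw [pvGo_nil] at hx
      simp only [List.mem_reverse, List.mem_cons] at hx
      rcases hx with h | h
      · exact Or.inr (h ▸ (List.prefix_append _ _).isInfix)
      · exact Or.inl h
    | c :: rest =>
      rw [pvGo_cons] at hx
      by_cases hp : sep.isPrefixOf (c :: rest) = true
      · rw [if_pos hp] at hx
        rcases ih _ _ _ _ hx with h | h
        · rcases List.mem_cons.1 h with h | h
          · exact Or.inr (h ▸ (List.prefix_append _ _).isInfix)
          · exact Or.inl h
        · refine Or.inr (h.trans ?_)
          simp only [List.reverse_nil, List.nil_append]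
          exact ((List.drop_suffix _ _).isInfix).trans (List.suffix_append _ _).isInfix
      · rw [if_neg hp] at hx
        rcases ih _ _ _ _ hx with h | h
        · exact Or.inl h
        · refine Or.inr ?_
          simpa using h

theorem pvMem_splitOn_infix {s sep x : List Char} (hx : x ∈ PySem.Chars.splitOn s sep) : x <:+: s := by
  rcases pvMem_go_infix sep (s.length + 1) s [] [] x hx with h | h
  · simp at h
  · simpa using h

-- a keyword found in a line of s.split('\n') is in s (so A's whole-text guard is true)
theorem pvGuard_of_mem {s l : String} (kw : String)
    (hl : l ∈ (PySem.Chars.splitOn s.toList ['\n']).map String.ofList)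
    (hkw : PySem.Str.isIn kw (PySem.Str.lower l) = true) :
    PySem.Str.isIn kw (PySem.Str.lower s) = true := by
  rcases List.mem_map.1 hl with ⟨x, hx, rfl⟩
  have hinf : x <:+: s.toList := pvMem_splitOn_infix hx
  rw [PySem.Str.isIn_eq, PySem.Str.toList_lower, PySem.Chars.isIn_iff_infix] at hkw ⊢
  rw [String.toList_ofList] at hkw
  simp only [PySem.Chars.lower] at hkw ⊢
  exact hkw.trans (hinf.map _)

def pvPick (o r : Option String) : Option String :=
  match o with
  | some v => some v
  | none => r.map pvExtractA

theorem pvFoldB_eq (lines : List String) :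
    ∀ a b c, lines.foldl pvStep (a, b, c) =
      (pvPick a (lines.find? pvMatch1), pvPick b (lines.find? pvMatch2), pvPick c (lines.find? pvMatch3)) := by
  induction lines with
  | nil => intro a b c; cases a <;> cases b <;> cases c <;> simp [pvPick]
  | cons l rest ih =>
    intro a b c
    have hstep : pvStep (a, b, c) l =
        ((if a.isNone && pvMatch1 l then some (pvExtractA l) else a),
         (if b.isNone && pvMatch2 l then some (pvExtractA l) else b),
         (if c.isNone && pvMatch3 l then some (pvExtractA l) else c)) := rfl
    simp only [List.foldl_cons, hstep, ih, List.find?_cons]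
    refine congrArg₂ _ ?_ (congrArg₂ _ ?_ ?_)
    · cases a <;> cases hm : pvMatch1 l <;> simp [pvPick]
    · cases b <;> cases hm : pvMatch2 l <;> simp [pvPick]
    · cases c <;> cases hm : pvMatch3 l <;> simp [pvPick]

theorem pvFindLoop_eq (p : String → Bool) (key : String) :
    ∀ (lines : List String) (d : PySem.Dict String String),
      pvFindLoop p key lines d =
        match lines.find? p with
        | some l => d.insert key (pvExtractA l)
        | none => d := by
  intro lines
  induction lines with
  | nil => intro d; rfl
  | cons l rest ih =>
    intro d
    by_cases h : p l = true
    · simp [pvFindLoop, h]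
    · simp only [pvFindLoop, List.find?_cons]
      rw [if_neg h, ih]
      cases hm : p l
      · rfl
      · exact absurd hm h

theorem pvGuard1 {s l1 : String}
    (h1 : ((PySem.Chars.splitOn s.toList ['\n']).map String.ofList).find? pvMatch1 = some l1) :
    (PySem.Str.isIn "high-focus" (PySem.Str.lower s) || PySem.Str.isIn "deep work" (PySem.Str.lower s)) = true := by
  have hmem := List.mem_of_find?_eq_some h1
  have hp : pvMatch1 l1 = true := List.find?_some h1
  simp only [pvMatch1, Bool.or_eq_true] at hp
  rcases hp with h | h
  · rw [pvGuard_of_mem _ hmem h]; rfl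
  · rw [pvGuard_of_mem _ hmem h]; simp

theorem pvGuard2 {s l2 : String}
    (h2 : ((PySem.Chars.splitOn s.toList ['\n']).map String.ofList).find? pvMatch2 = some l2) :
    (PySem.Str.isIn "task execution" (PySem.Str.lower s) || PySem.Str.isIn "task completion" (PySem.Str.lower s)) = true := by
  have hmem := List.mem_of_find?_eq_some h2
  have hp : pvMatch2 l2 = true := List.find?_some h2
  simp only [pvMatch2, Bool.or_eq_true] at hp
  rcases hp with h | h
  · rw [pvGuard_of_mem _ hmem h]; rfl
  · rw [pvGuard_of_mem _ hmem h]; simp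

theorem pvGuard3 {s l3 : String}
    (h3 : ((PySem.Chars.splitOn s.toList ['\n']).map String.ofList).find? pvMatch3 = some l3) :
    PySem.Str.isIn "habit" (PySem.Str.lower s) = true := by
  have hmem := List.mem_of_find?_eq_some h3
  have hp : pvMatch3 l3 = true := List.find?_some h3
  simp only [pvMatch3] at hp
  exact pvGuard_of_mem _ hmem hp

-- ===== VERDICT (by name: the statement is the Claim_ definition above) =====
theorem parse_optimal_times_response_py_spec : Claim_equal_parse_optimal_times_response_py := by
  intro s _
  unfold Spec_parse_optimal_times_response_py
  simp only [parse_optimal_times_response_py, parse_optimal_times_response_py_alt]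
  rw [pvFoldB_eq]
  rw [pvFindLoop_eq, pvFindLoop_eq, pvFindLoop_eq]
  rcases h1 : ((PySem.Chars.splitOn s.toList ['\n']).map String.ofList).find? pvMatch1 with _ | l1 <;>
    rcases h2 : ((PySem.Chars.splitOn s.toList ['\n']).map String.ofList).find? pvMatch2 with _ | l2 <;>
      rcases h3 : ((PySem.Chars.splitOn s.toList ['\n']).map String.ofList).find? pvMatch3 with _ | l3 <;>
        simp only [pvPick, ite_self, Option.map_some, Option.map_none,
          Option.getD_some, Option.getD_none] <;>
        [skip; rw [if_pos (pvGuard3 h3)]; rw [if_pos (pvGuard2 h2)];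
         rw [if_pos (pvGuard2 h2), if_pos (pvGuard3 h3)]; rw [if_pos (pvGuard1 h1)];
         rw [if_pos (pvGuard1 h1), if_pos (pvGuard3 h3)];
         rw [if_pos (pvGuard1 h1), if_pos (pvGuard2 h2)];
         rw [if_pos (pvGuard1 h1), if_pos (pvGuard2 h2), if_pos (pvGuard3 h3)]] <;>
        rfl
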